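-- pv_equiv track=rewrite | github.com/Victory-Hugo/10-mtDNA | 12-单倍群年龄估计/python/s03_build_sample_mapping.py | _bfs_descendants
-- ===== SOURCE A (Python) =====
-- from collections import deque
--
-- def _bfs_descendants(graph: dict, haplogroup: str) -> set:
--     """BFS获取某单倍群的所有后代节点名称（含自身）。"""
--     result = set()
--     queue = deque([haplogroup])
--     while queue:
--         node = queue.popleft()
--         if node in result:
--             continue
--         result.add(node)
--         for child in graph.get(node, {}).get("children", []):
--             queue.append(child)
--     return result
-- ===== SOURCE B (Python) =====
-- def _bfs_descendants(graph: dict, haplogroup: str) -> set: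
--     """Level-by-level frontier expansion: len(graph) rounds suffice, since each
--     further level consumes a distinct graph key; no deque, dedup at discovery."""
--     seen = {haplogroup}
--     frontier = [haplogroup]
--     for _ in range(len(graph)):
--         next_frontier = []
--         for node in frontier:
--             for child in graph.get(node, {}).get("children", []):
--                 if child not in seen:
--                     seen.add(child)
--                     next_frontier.append(child)
--         frontier = next_frontier
--     return seen
-- ===== Notes on version B (the rewrite author's own statement) =====
-- stated objective: alternative
-- what changed: Replaced the deque-based BFS with dequeue-time dedup by a bounded level-by-level frontier expansion: exactly len(graph) rounds of a for-loop, marking nodes as seen at discovery time, with no queue and no membership re-check at pop.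
import Mathlib
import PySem

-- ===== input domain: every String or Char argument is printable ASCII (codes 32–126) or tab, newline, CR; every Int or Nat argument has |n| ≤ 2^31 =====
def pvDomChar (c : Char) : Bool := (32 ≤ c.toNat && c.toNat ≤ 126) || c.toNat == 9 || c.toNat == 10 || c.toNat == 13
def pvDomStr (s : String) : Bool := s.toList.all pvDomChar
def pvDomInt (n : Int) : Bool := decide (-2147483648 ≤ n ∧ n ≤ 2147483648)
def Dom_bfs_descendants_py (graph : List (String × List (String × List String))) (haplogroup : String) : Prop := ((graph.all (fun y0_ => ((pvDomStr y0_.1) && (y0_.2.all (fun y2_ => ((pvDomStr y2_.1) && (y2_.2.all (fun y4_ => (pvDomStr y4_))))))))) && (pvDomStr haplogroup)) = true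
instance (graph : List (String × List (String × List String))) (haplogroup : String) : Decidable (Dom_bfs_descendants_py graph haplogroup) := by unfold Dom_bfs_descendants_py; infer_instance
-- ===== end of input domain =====

-- B restructures A's deque-BFS into a bounded level-by-level frontier expansion (same return value; objective: alternative decomposition).

-- shared helper: graph.get(node, {}).get("children", [])
def pvChildren (g : List (String × List (String × List String))) (node : String) : List String :=
  (PySem.Dict.mk ((PySem.Dict.mk g).getD node [])).getD "children" []

-- all strings that can ever appear as a child (used only for A's termination measure)
def pvAllCh (g : List (String × List (String × List String))) : List String :=
  g.flatMap (fun e => e.2.flatMap (fun p => p.2))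

-- every child produced by a lookup occurs in pvAllCh (cited by aLoopGo's recursion)
theorem pvChildren_sub (g : List (String × List (String × List String))) (node : String)
    (c : String) (hc : c ∈ pvChildren g node) : c ∈ pvAllCh g := by
  unfold pvChildren at hc
  simp only [PySem.Dict.getD, PySem.Dict.get?] at hc
  cases h1 : List.find? (fun p => p.1 == node) g with
  | none => rw [h1] at hc; simp at hc
  | some e =>
    rw [h1] at hc
    simp only [Option.map_some, Option.getD_some] at hc
    cases h2 : List.find? (fun p => p.1 == "children") e.2 with
    | none => rw [h2] at hc; simp at hc
    | some p2 =>
      rw [h2] at hc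
      simp only [Option.map_some, Option.getD_some] at hc
      exact List.mem_flatMap.mpr ⟨e, List.mem_of_find?_eq_some h1,
        List.mem_flatMap.mpr ⟨p2, List.mem_of_find?_eq_some h2, hc⟩⟩

-- strictness of a filtered count (cited by aLoopGo's decreasing_by and by the main induction)
theorem pv_filter_lt {α : Type} [DecidableEq α] (l : List α) (r s : List α)
    (himp : ∀ y, y ∉ s → y ∉ r) (x : α) (hx : x ∈ l) (hxr : x ∉ r) (hxs : x ∈ s) :
    (l.filter (fun y => !decide (y ∈ s))).length < (l.filter (fun y => !decide (y ∈ r))).length := by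
  induction l with
  | nil => simp at hx
  | cons a t ih =>
    have hsub : (t.filter (fun y => !decide (y ∈ s))).length ≤ (t.filter (fun y => !decide (y ∈ r))).length :=
      (List.monotone_filter_right t (fun y hy => by
        simp only [Bool.not_eq_true', decide_eq_false_iff_not] at hy ⊢
        exact himp y hy)).length_le
    rcases List.mem_cons.mp hx with rfl | hxt
    · simp only [List.filter_cons, hxs, hxr, decide_true, decide_false, Bool.not_true,
        Bool.not_false, Bool.false_eq_true, if_false, if_true, List.length_cons]
      omega
    · have hih := ih hxt
      by_cases hs : a ∈ s
      · by_cases hr : a ∈ r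
        · simpa [List.filter_cons, hs, hr] using hih
        · simp only [List.filter_cons, hs, hr, decide_true, decide_false, Bool.not_true,
            Bool.not_false, Bool.false_eq_true, if_false, if_true, List.length_cons]
          omega
      · have hr : a ∉ r := himp a hs
        simp only [List.filter_cons, hs, hr, decide_false, Bool.not_false, if_true,
          List.length_cons]
        omega

-- ===== PORT A =====
-- A's while-loop over (result, queue); the hypothesis argument only feeds the termination measure
def aLoopGo (g : List (String × List (String × List String))) (hap : String) :
    (r : PySem.Set String) → (q : List String) →
    (∀ y ∈ q, y ∈ hap :: pvAllCh g) → PySem.Set String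
  | r, [], _ => r
  | r, x :: qs, hq =>
    if hx : x ∈ r then
      aLoopGo g hap r qs (fun y hy => hq y (List.mem_cons_of_mem x hy))
    else
      aLoopGo g hap (r.add x) (qs ++ pvChildren g x)
        (fun y hy => by
          rcases List.mem_append.mp hy with h1 | h2
          · exact hq y (List.mem_cons_of_mem x h1)
          · exact List.mem_cons_of_mem hap (pvChildren_sub g x y h2))
termination_by r q _ => ((((hap :: pvAllCh g).dedup).filter (fun y => !decide (y ∈ r))).length, q.length)
decreasing_by
  · exact Prod.Lex.right _ (by simp)
  · exact Prod.Lex.left _ _ (by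
      refine pv_filter_lt _ r (r.add x) (fun y hy => ?_) x
        (List.mem_dedup.mpr (hq x (List.mem_cons_self))) hx
        ((PySem.Set.mem_add r x x).mpr (Or.inr rfl))
      intro hyr
      exact hy ((PySem.Set.mem_add r x y).mpr (Or.inl hyr)))

def bfs_descendants_py (graph : List (String × List (String × List String))) (haplogroup : String) : List String :=
  aLoopGo graph haplogroup PySem.Set.empty [haplogroup]
    (fun y hy => by
      rcases List.mem_singleton.mp hy with rfl
      exact List.mem_cons_self)

-- ===== PORT B =====
-- one round of B's for-loop: scan the frontier, collect unseen children
def pvLevelStep (g : List (String × List (String × List String)))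
    (st : PySem.Set String × List String) : PySem.Set String × List String :=
  st.2.foldl (fun st2 node =>
      (pvChildren g node).foldl (fun st3 c =>
          if c ∈ st3.1 then st3 else (st3.1.add c, st3.2 ++ [c])) st2)
    (st.1, [])

def bfs_descendants_py_alt (graph : List (String × List (String × List String))) (haplogroup : String) : List String :=
  ((PySem.List.pyRange 0 (PySem.List.len graph) 1).foldl
      (fun st _ => pvLevelStep graph st)
      (PySem.Set.add PySem.Set.empty haplogroup, [haplogroup])).1

-- ===== PRECONDITION & SPEC =====
def Spec_bfs_descendants_py (graph : List (String × List (String × List String))) (haplogroup : String) (out : List String) : Prop := out = bfs_descendants_py_alt graph haplogroup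
instance (graph : List (String × List (String × List String))) (haplogroup : String) (out : List String) : Decidable (Spec_bfs_descendants_py graph haplogroup out) := by unfold Spec_bfs_descendants_py; infer_instance

-- ===== CLAIM (what is proved, stated in full; the proofs are below) =====
def Claim_equal_bfs_descendants_py : Prop := ∀ (graph : List (String × List (String × List String))) (haplogroup : String), Dom_bfs_descendants_py graph haplogroup → Spec_bfs_descendants_py graph haplogroup (bfs_descendants_py graph haplogroup)

-- ===== LEMMAS AND PROOFS =====

-- add every element of a list to a set, in order
def pvAddAll (r : PySem.Set String) (l : List String) : PySem.Set String :=
  l.foldl PySem.Set.add r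

-- the new elements of `kids` relative to `r`, first occurrences, in order
def pvNew (r : PySem.Set String) : List String → List String
  | [] => []
  | c :: cs => if c ∈ r then pvNew r cs else c :: pvNew (r.add c) cs

theorem pv_mem_add (r : PySem.Set String) (x y : String) :
    y ∈ r.add x ↔ y ∈ r ∨ y = x := PySem.Set.mem_add r x y

theorem pv_mem_addAll : ∀ (l : List String) (r : PySem.Set String) (y : String),
    y ∈ pvAddAll r l ↔ y ∈ r ∨ y ∈ l := by
  intro l
  induction l with
  | nil => intro r y; simp [pvAddAll]
  | cons c cs ih =>
    intro r y
    have : pvAddAll r (c :: cs) = pvAddAll (r.add c) cs := rfl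
    rw [this, ih, pv_mem_add]
    simp only [List.mem_cons]
    tauto

theorem pvNew_mem : ∀ (kids : List String) (r : PySem.Set String) (y : String),
    y ∈ pvNew r kids → y ∈ kids ∧ y ∉ r := by
  intro kids
  induction kids with
  | nil => intro r y hy; simp [pvNew] at hy
  | cons c cs ih =>
    intro r y hy
    by_cases hc : c ∈ r
    · rw [show pvNew r (c :: cs) = pvNew r cs from by simp [pvNew, hc]] at hy
      obtain ⟨h1, h2⟩ := ih r y hy
      exact ⟨List.mem_cons_of_mem c h1, h2⟩
    · rw [show pvNew r (c :: cs) = c :: pvNew (r.add c) cs from by simp [pvNew, hc]] at hy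
      rcases List.mem_cons.mp hy with rfl | hy'
      · exact ⟨List.mem_cons_self, hc⟩
      · obtain ⟨h1, h2⟩ := ih (r.add c) y hy'
        exact ⟨List.mem_cons_of_mem c h1, fun hyr => h2 ((pv_mem_add r c y).mpr (Or.inl hyr))⟩

theorem pvNew_nodup : ∀ (kids : List String) (r : PySem.Set String), (pvNew r kids).Nodup := by
  intro kids
  induction kids with
  | nil => intro r; simp [pvNew]
  | cons c cs ih =>
    intro r
    by_cases hc : c ∈ r
    · rw [show pvNew r (c :: cs) = pvNew r cs from by simp [pvNew, hc]]
      exact ih r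
    · rw [show pvNew r (c :: cs) = c :: pvNew (r.add c) cs from by simp [pvNew, hc]]
      refine List.nodup_cons.mpr ⟨fun hmem => ?_, ih (r.add c)⟩
      exact (pvNew_mem cs (r.add c) c hmem).2 ((pv_mem_add r c c).mpr (Or.inr rfl))

-- if the lookup finds children, node heads an entry of the graph
theorem pvChildren_key (g : List (String × List (String × List String))) (node : String)
    (h : pvChildren g node ≠ []) : node ∈ g.map Prod.fst := by
  by_contra hmem
  apply h
  unfold pvChildren
  have hfind : List.find? (fun p => p.1 == node) g = none := by
    refine List.find?_eq_none.mpr (fun p hp => ?_)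
    intro hbeq
    exact hmem (List.mem_map.mpr ⟨p, hp, by simpa using hbeq⟩)
  simp only [PySem.Dict.getD, PySem.Dict.get?]
  rw [hfind]
  rfl

-- unfolding equations for aLoopGo
theorem aLoopGo_nil (g : List (String × List (String × List String))) (hap : String)
    (r : PySem.Set String) (hq : ∀ y ∈ ([] : List String), y ∈ hap :: pvAllCh g) :
    aLoopGo g hap r [] hq = r := by
  rw [aLoopGo]

theorem aLoopGo_cons_mem (g : List (String × List (String × List String))) (hap : String)
    (r : PySem.Set String) (x : String) (qs : List String)
    (hq : ∀ y ∈ x :: qs, y ∈ hap :: pvAllCh g) (hq' : ∀ y ∈ qs, y ∈ hap :: pvAllCh g)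
    (hx : x ∈ r) :
    aLoopGo g hap r (x :: qs) hq = aLoopGo g hap r qs hq' := by
  rw [aLoopGo]; simp [hx]

theorem aLoopGo_cons_not_mem (g : List (String × List (String × List String))) (hap : String)
    (r : PySem.Set String) (x : String) (qs : List String)
    (hq : ∀ y ∈ x :: qs, y ∈ hap :: pvAllCh g)
    (hq' : ∀ y ∈ qs ++ pvChildren g x, y ∈ hap :: pvAllCh g)
    (hx : x ∉ r) :
    aLoopGo g hap r (x :: qs) hq = aLoopGo g hap (r.add x) (qs ++ pvChildren g x) hq' := by
  rw [aLoopGo]; simp [hx]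

-- proof-irrelevant congruence in the queue argument
theorem aLoopGo_congr (g : List (String × List (String × List String))) (hap : String)
    (r : PySem.Set String) {q q' : List String} (h : q = q')
    (hq : ∀ y ∈ q, y ∈ hap :: pvAllCh g) (hq' : ∀ y ∈ q', y ∈ hap :: pvAllCh g) :
    aLoopGo g hap r q hq = aLoopGo g hap r q' hq' := by subst h; rfl

-- L2: elements already seen (or repeated) in the queue prefix are skipped
theorem pv_dedup_queue (g : List (String × List (String × List String))) (hap : String) :
    ∀ (q tail : List String) (r : PySem.Set String)
      (hq : ∀ y ∈ q ++ tail, y ∈ hap :: pvAllCh g)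
      (hq' : ∀ y ∈ pvNew r q ++ tail, y ∈ hap :: pvAllCh g),
    aLoopGo g hap r (q ++ tail) hq = aLoopGo g hap r (pvNew r q ++ tail) hq' := by
  intro q
  induction q with
  | nil =>
    intro tail r hq hq'
    exact aLoopGo_congr g hap r (by simp [pvNew]) hq hq'
  | cons c cs ih =>
    intro tail r hq hq'
    by_cases hc : c ∈ r
    · have hnew : pvNew r (c :: cs) = pvNew r cs := by simp [pvNew, hc]
      refine Eq.trans (aLoopGo_cons_mem g hap r c (cs ++ tail) hq
        (fun y hy => hq y (List.mem_cons_of_mem c hy)) hc) ?_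
      refine Eq.trans (ih tail r (fun y hy => hq y (List.mem_cons_of_mem c hy))
        (fun y hy => hq' y (by rw [hnew]; exact hy))) ?_
      exact aLoopGo_congr g hap r (by rw [hnew]) _ hq'
    · have hnew : pvNew r (c :: cs) = c :: pvNew (r.add c) cs := by simp [pvNew, hc]
      have hq1 : ∀ y ∈ (cs ++ tail) ++ pvChildren g c, y ∈ hap :: pvAllCh g := by
        intro y hy
        rcases List.mem_append.mp hy with h1 | h2
        · exact hq y (List.mem_cons_of_mem c h1)
        · exact List.mem_cons_of_mem hap (pvChildren_sub g c y h2)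
      have hq2 : ∀ y ∈ cs ++ (tail ++ pvChildren g c), y ∈ hap :: pvAllCh g := by
        rw [← List.append_assoc]; exact hq1
      have hq3 : ∀ y ∈ pvNew (r.add c) cs ++ (tail ++ pvChildren g c), y ∈ hap :: pvAllCh g := by
        intro y hy
        rcases List.mem_append.mp hy with h1 | h2
        · exact hq2 y (List.mem_append.mpr (Or.inl (pvNew_mem cs (r.add c) y h1).1))
        · exact hq2 y (List.mem_append.mpr (Or.inr h2))
      refine Eq.trans (aLoopGo_cons_not_mem g hap r c (cs ++ tail) hq hq1 hc) ?_
      refine Eq.trans (aLoopGo_congr g hap (r.add c) (List.append_assoc cs tail _) hq1 hq2) ?_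
      refine Eq.trans (ih (tail ++ pvChildren g c) (r.add c) hq2 hq3) ?_
      have hqc : ∀ y ∈ c :: (pvNew (r.add c) cs ++ tail), y ∈ hap :: pvAllCh g := by
        intro y hy
        rcases List.mem_cons.mp hy with rfl | hy'
        · exact hq y List.mem_cons_self
        · rcases List.mem_append.mp hy' with h1 | h2
          · exact hq3 y (List.mem_append.mpr (Or.inl h1))
          · exact hq y (List.mem_cons_of_mem c (List.mem_append.mpr (Or.inr h2)))
      have hqd : ∀ y ∈ (pvNew (r.add c) cs ++ tail) ++ pvChildren g c, y ∈ hap :: pvAllCh g := by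
        intro y hy
        rcases List.mem_append.mp hy with h1 | h2
        · rcases List.mem_append.mp h1 with h3 | h4
          · exact hq3 y (List.mem_append.mpr (Or.inl h3))
          · exact hq3 y (List.mem_append.mpr (Or.inr (List.mem_append.mpr (Or.inl h4))))
        · exact List.mem_cons_of_mem hap (pvChildren_sub g c y h2)
      refine Eq.trans (aLoopGo_congr g hap (r.add c)
        (List.append_assoc (pvNew (r.add c) cs) tail _).symm hq3 hqd) ?_
      refine Eq.trans (aLoopGo_cons_not_mem g hap r c (pvNew (r.add c) cs ++ tail) hqc hqd hc).symm ?_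
      exact aLoopGo_congr g hap r (by rw [hnew]; rfl) hqc hq'

-- L1: flushing a fresh nodup prefix of the queue adds it and appends its children
theorem pv_flush (g : List (String × List (String × List String))) (hap : String) :
    ∀ (q tail : List String) (r : PySem.Set String)
      (hnd : q.Nodup) (hdisj : ∀ x ∈ q, x ∉ r)
      (hq : ∀ y ∈ q ++ tail, y ∈ hap :: pvAllCh g)
      (hq' : ∀ y ∈ tail ++ q.flatMap (pvChildren g), y ∈ hap :: pvAllCh g),
    aLoopGo g hap r (q ++ tail) hq
      = aLoopGo g hap (pvAddAll r q) (tail ++ q.flatMap (pvChildren g)) hq' := by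
  have hch : ∀ (x y : String), y ∈ pvChildren g x → y ∈ hap :: pvAllCh g :=
    fun x y h => List.mem_cons_of_mem hap (pvChildren_sub g x y h)
  intro q
  induction q with
  | nil =>
    intro tail r hnd hdisj hq hq'
    exact aLoopGo_congr g hap r (List.append_nil tail).symm hq hq'
  | cons x qs ih =>
    intro tail r hnd hdisj hq hq'
    have hx : x ∉ r := hdisj x List.mem_cons_self
    have hqA : ∀ y ∈ (qs ++ tail) ++ pvChildren g x, y ∈ hap :: pvAllCh g := by
      intro y hy
      rcases List.mem_append.mp hy with h1 | h2
      · exact hq y (List.mem_cons_of_mem x h1)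
      · exact hch x y h2
    have hqB : ∀ y ∈ qs ++ (tail ++ pvChildren g x), y ∈ hap :: pvAllCh g := by
      rw [← List.append_assoc]; exact hqA
    have hqC : ∀ y ∈ (tail ++ pvChildren g x) ++ qs.flatMap (pvChildren g),
        y ∈ hap :: pvAllCh g := by
      intro y hy
      rcases List.mem_append.mp hy with h1 | h2
      · rcases List.mem_append.mp h1 with h3 | h4
        · exact hq y (List.mem_append.mpr (Or.inr h3))
        · exact hch x y h4
      · obtain ⟨x', hx', hy'⟩ := List.mem_flatMap.mp h2
        exact hch x' y hy'
    refine Eq.trans (aLoopGo_cons_not_mem g hap r x (qs ++ tail) hq hqA hx) ?_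
    refine Eq.trans (aLoopGo_congr g hap (r.add x) (List.append_assoc qs tail _) hqA hqB) ?_
    refine Eq.trans (ih (tail ++ pvChildren g x) (r.add x) (List.nodup_cons.mp hnd).2
      (fun y hy hmem => ?_) hqB hqC) ?_
    · rcases (pv_mem_add r x y).mp hmem with h1 | rfl
      · exact hdisj y (List.mem_cons_of_mem x hy) h1
      · exact (List.nodup_cons.mp hnd).1 hy
    · exact aLoopGo_congr g hap (pvAddAll (r.add x) qs)
        (by rw [List.append_assoc, List.flatMap_cons]) hqC hq'

-- B's collect loop, characterised
theorem pvCollect_eq :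
    ∀ (kids : List String) (st : PySem.Set String × List String),
    kids.foldl (fun st3 c => if c ∈ st3.1 then st3 else (st3.1.add c, st3.2 ++ [c])) st
      = (pvAddAll st.1 (pvNew st.1 kids), st.2 ++ pvNew st.1 kids) := by
  intro kids
  induction kids with
  | nil => intro st; simp [pvNew, pvAddAll]
  | cons c cs ih =>
    intro st
    by_cases hc : c ∈ st.1
    · rw [List.foldl_cons, if_pos hc, ih st,
        show pvNew st.1 (c :: cs) = pvNew st.1 cs from by simp [pvNew, hc]]
    · rw [List.foldl_cons, if_neg hc, ih (st.1.add c, st.2 ++ [c]),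
        show pvNew st.1 (c :: cs) = c :: pvNew (st.1.add c) cs from by simp [pvNew, hc]]
      simp [pvAddAll]

theorem pvLevelStep_eq (g : List (String × List (String × List String)))
    (s : PySem.Set String) (fr : List String) :
    pvLevelStep g (s, fr)
      = (pvAddAll s (pvNew s (fr.flatMap (pvChildren g))),
         pvNew s (fr.flatMap (pvChildren g))) := by
  unfold pvLevelStep
  rw [← List.foldl_flatMap, pvCollect_eq]
  simp

theorem pv_foldl_const {α β : Type} (f : β → β) :
    ∀ (l : List α) (s : β), l.foldl (fun st _ => f st) s = f^[l.length] s := by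
  intro l
  induction l with
  | nil => intro s; simp
  | cons a t ih =>
    intro s
    rw [List.foldl_cons, ih (f s), List.length_cons, Function.iterate_succ_apply]

-- main induction: k rounds of B simulate A's loop when at most k useful keys remain
theorem pvM (g : List (String × List (String × List String))) (hap : String) :
    ∀ (k : Nat) (r : PySem.Set String) (fr : List String)
      (hq : ∀ y ∈ fr, y ∈ hap :: pvAllCh g)
      (hnd : fr.Nodup) (hdisj : ∀ x ∈ fr, x ∉ r)
      (hk : (((g.map Prod.fst).dedup).filter (fun y => !decide (y ∈ r))).length ≤ k),
    aLoopGo g hap r fr hq = ((pvLevelStep g)^[k] (pvAddAll r fr, fr)).1 := by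
  have hch : ∀ (x y : String), y ∈ pvChildren g x → y ∈ hap :: pvAllCh g :=
    fun x y h => List.mem_cons_of_mem hap (pvChildren_sub g x y h)
  intro k
  induction k with
  | zero =>
    intro r fr hq hnd hdisj hk
    have hkeys : ∀ y ∈ (g.map Prod.fst).dedup, y ∈ r := by
      intro y hy
      by_contra hyr
      have h0 : (((g.map Prod.fst).dedup).filter (fun y => !decide (y ∈ r))).length = 0 :=
        Nat.le_zero.mp hk
      have := List.filter_eq_nil_iff.mp (List.length_eq_zero_iff.mp h0) y hy
      simp only [Bool.not_eq_true', decide_eq_false_iff_not, not_not] at this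
      exact hyr this
    have hkids : fr.flatMap (pvChildren g) = [] := by
      refine List.flatMap_eq_nil_iff.mpr (fun x hx => ?_)
      by_contra hne
      exact hdisj x hx (hkeys x (List.mem_dedup.mpr (pvChildren_key g x hne)))
    have hqe : ∀ y ∈ ([] : List String) ++ fr.flatMap (pvChildren g), y ∈ hap :: pvAllCh g := by
      intro y hy
      obtain ⟨x', _, hy'⟩ := List.mem_flatMap.mp (by simpa using hy)
      exact hch x' y hy'
    refine Eq.trans (aLoopGo_congr g hap r (List.append_nil fr).symm hq
      (fun y hy => hq y (by simpa using hy))) ?_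
    refine Eq.trans (pv_flush g hap fr [] r hnd hdisj _ hqe) ?_
    refine Eq.trans (aLoopGo_congr g hap (pvAddAll r fr) (q' := [])
      (by simp [hkids]) hqe (fun y hy => by simp at hy)) ?_
    exact aLoopGo_nil g hap (pvAddAll r fr) (fun y hy => by simp at hy)
  | succ k ih =>
    intro r fr hq hnd hdisj hk
    have hqk : ∀ y ∈ fr.flatMap (pvChildren g), y ∈ hap :: pvAllCh g := by
      intro y hy
      obtain ⟨x', _, hy'⟩ := List.mem_flatMap.mp hy
      exact hch x' y hy'
    have hqn : ∀ y ∈ pvNew (pvAddAll r fr) (fr.flatMap (pvChildren g)), y ∈ hap :: pvAllCh g :=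
      fun y hy => hqk y (pvNew_mem _ _ y hy).1
    -- A-side: flush the frontier, then drop seen/duplicate kids
    have hA : aLoopGo g hap r fr hq
        = aLoopGo g hap (pvAddAll r fr)
            (pvNew (pvAddAll r fr) (fr.flatMap (pvChildren g))) hqn := by
      refine Eq.trans (aLoopGo_congr g hap r (List.append_nil fr).symm hq
        (fun y hy => hq y (by simpa using hy))) ?_
      refine Eq.trans (pv_flush g hap fr [] r hnd hdisj _
        (fun y hy => hqk y (by simpa using hy))) ?_
      refine Eq.trans (aLoopGo_congr g hap (pvAddAll r fr)
        (show ([] : List String) ++ fr.flatMap (pvChildren g)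
            = fr.flatMap (pvChildren g) ++ [] from by simp)
        (fun y hy => hqk y (by simpa using hy))
        (fun y hy => hqk y (by simpa using hy))) ?_
      refine Eq.trans (pv_dedup_queue g hap (fr.flatMap (pvChildren g)) [] (pvAddAll r fr)
        (fun y hy => hqk y (by simpa using hy))
        (fun y hy => hqn y (by simpa using hy))) ?_
      exact aLoopGo_congr g hap (pvAddAll r fr) (by simp) _ hqn
    -- B-side: one round of the level step
    have hB : (pvLevelStep g)^[k + 1] (pvAddAll r fr, fr)
        = (pvLevelStep g)^[k]
            (pvAddAll (pvAddAll r fr) (pvNew (pvAddAll r fr) (fr.flatMap (pvChildren g))),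
             pvNew (pvAddAll r fr) (fr.flatMap (pvChildren g))) := by
      rw [Function.iterate_succ_apply, pvLevelStep_eq]
    by_cases hn : pvNew (pvAddAll r fr) (fr.flatMap (pvChildren g)) = []
    · rw [hA, hB]
      refine Eq.trans (aLoopGo_congr g hap (pvAddAll r fr) hn hqn
        (fun y hy => by simp at hy)) ?_
      rw [hn, aLoopGo_nil]
      have hfix : (pvLevelStep g)^[k] (pvAddAll (pvAddAll r fr) [], ([] : List String))
          = (pvAddAll (pvAddAll r fr) [], ([] : List String)) :=
        Function.iterate_fixed rfl k
      rw [hfix]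
      rfl
    · obtain ⟨c, hcnxt⟩ := List.exists_mem_of_ne_nil _ hn
      have hckids := (pvNew_mem _ _ c hcnxt).1
      obtain ⟨node, hnodefr, hcch⟩ := List.mem_flatMap.mp hckids
      have hkey : node ∈ (g.map Prod.fst).dedup :=
        List.mem_dedup.mpr (pvChildren_key g node (List.ne_nil_of_mem hcch))
      have hlt := pv_filter_lt ((g.map Prod.fst).dedup) r (pvAddAll r fr)
        (fun y hy hyr => hy ((pv_mem_addAll fr r y).mpr (Or.inl hyr)))
        node hkey (hdisj node hnodefr) ((pv_mem_addAll fr r node).mpr (Or.inr hnodefr))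
      rw [hA, hB]
      exact ih (pvAddAll r fr) (pvNew (pvAddAll r fr) (fr.flatMap (pvChildren g))) hqn
        (pvNew_nodup _ _) (fun x hx => (pvNew_mem _ _ x hx).2) (by omega)

-- ===== VERDICT (by name: the statement is the Claim_ definition above) =====
theorem bfs_descendants_py_spec : Claim_equal_bfs_descendants_py := by
  unfold Claim_equal_bfs_descendants_py
  intro g hap _
  unfold Spec_bfs_descendants_py bfs_descendants_py bfs_descendants_py_alt
  rw [pv_foldl_const]
  have hlen : (PySem.List.pyRange 0 (PySem.List.len g) 1).length = g.length := by
    simp [PySem.List.length_pyRange_one, PySem.List.len]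
  rw [hlen]
  have hbound : (((g.map Prod.fst).dedup).filter
      (fun y => !decide (y ∈ PySem.Set.empty))).length ≤ g.length := by
    calc (((g.map Prod.fst).dedup).filter (fun y => !decide (y ∈ PySem.Set.empty))).length
        ≤ ((g.map Prod.fst).dedup).length := List.length_filter_le _ _
      _ ≤ (g.map Prod.fst).length := (List.dedup_sublist _).length_le
      _ = g.length := List.length_map _
  exact pvM g hap g.length PySem.Set.empty [hap]
    (fun y hy => by rcases List.mem_singleton.mp hy with rfl; exact List.mem_cons_self)
    (by simp) (fun x hx hmem => by simp [PySem.Set.empty] at hmem) hbound
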